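-- pv_equiv track=rewrite | github.com/sandeepitc7982/price-scraper-sweden | code/src/price_monitor/finance_scraper/bmw/finance_scraper.py | update_selected_options_with_metallic_paint
-- ===== SOURCE A (Python) =====
-- def update_selected_options_with_metallic_paint(
--     selected_line_option_codes,
--     metallic_paints,
--     non_metallic_paints,
--     lowest_price_metallic_paint,
-- ):
--     # metallic and non-metallic paints list
--     paints_to_remove = metallic_paints + non_metallic_paints
--     # Remove paint from standard option
--     for paint in paints_to_remove:
--         if paint["paint_code"] in selected_line_option_codes:
--             selected_line_option_codes.remove(paint["paint_code"])
--
--     # Add the lowest price metallic paint to the selected options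
--     selected_line_option_codes.append(lowest_price_metallic_paint["paint_code"])
--     selected_line_option_codes.sort()
--     return selected_line_option_codes
-- ===== SOURCE B (Python) =====
-- def update_selected_options_with_metallic_paint(
--     selected_line_option_codes,
--     metallic_paints,
--     non_metallic_paints,
--     lowest_price_metallic_paint,
-- ):
--     # Count how many times each paint code occurs among the paints to remove.
--     remaining = {}
--     for paint in metallic_paints + non_metallic_paints:
--         code = paint["paint_code"]
--         remaining[code] = remaining.get(code, 0) + 1
--     # One pass over the selected codes: drop a code while its removal budget lasts.
--     kept = []
--     for code in selected_line_option_codes: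
--         if remaining.get(code, 0) > 0:
--             remaining[code] = remaining[code] - 1
--         else:
--             kept.append(code)
--     kept.append(lowest_price_metallic_paint["paint_code"])
--     kept.sort()
--     # Mutate the caller's list in place, like A does.
--     selected_line_option_codes[:] = kept
--     return selected_line_option_codes
-- ===== Notes on version B (the rewrite author's own statement) =====
-- stated objective: faster
-- what changed: Instead of looping over all paints and calling 'in'/'.remove' on the selected list (a linear scan per paint), B builds a dict counting paint codes once and filters the selected list in a single pass, decrementing the counter, then appends the cheapest metallic code and sorts; the same list object is mutated in place.
import Mathlib
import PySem

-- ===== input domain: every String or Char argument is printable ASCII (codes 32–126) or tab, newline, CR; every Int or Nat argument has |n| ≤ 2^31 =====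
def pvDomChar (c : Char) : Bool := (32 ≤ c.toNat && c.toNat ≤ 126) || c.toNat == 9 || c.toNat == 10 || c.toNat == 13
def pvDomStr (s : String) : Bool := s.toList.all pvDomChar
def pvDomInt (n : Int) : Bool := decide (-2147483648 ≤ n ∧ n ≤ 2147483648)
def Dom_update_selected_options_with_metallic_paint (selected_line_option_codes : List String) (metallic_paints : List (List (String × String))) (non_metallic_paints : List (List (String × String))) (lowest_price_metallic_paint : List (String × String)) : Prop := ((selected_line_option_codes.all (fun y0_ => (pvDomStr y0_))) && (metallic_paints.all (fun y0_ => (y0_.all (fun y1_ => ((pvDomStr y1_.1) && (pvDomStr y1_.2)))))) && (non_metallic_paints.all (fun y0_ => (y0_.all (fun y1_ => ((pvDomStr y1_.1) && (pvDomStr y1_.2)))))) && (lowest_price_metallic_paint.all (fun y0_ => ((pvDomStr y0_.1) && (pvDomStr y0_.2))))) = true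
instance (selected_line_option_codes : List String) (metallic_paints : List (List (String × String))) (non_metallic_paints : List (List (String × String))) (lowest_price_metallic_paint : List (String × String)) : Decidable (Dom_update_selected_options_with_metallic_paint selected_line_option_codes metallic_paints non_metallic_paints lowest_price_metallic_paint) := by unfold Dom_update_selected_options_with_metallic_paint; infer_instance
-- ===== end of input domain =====

-- ===== PORT A =====
-- B replaces A's per-paint membership-test-and-.remove scans by a single counting dict
-- and one filtering pass (one pass instead of a membership scan per paint); both mutate the selected list in place in Python,
-- the equivalence proved here is about the returned value.

-- paint["paint_code"]; the default "" is never reached under Pre_ (missing key = KeyError)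
def pvPaintCode (paint : List (String × String)) : String :=
  (PySem.Dict.mk paint).getD "paint_code" ""

def update_selected_options_with_metallic_paint (selected_line_option_codes : List String) (metallic_paints : List (List (String × String))) (non_metallic_paints : List (List (String × String))) (lowest_price_metallic_paint : List (String × String)) : List String :=
  let paints_to_remove := metallic_paints ++ non_metallic_paints
  let sel := paints_to_remove.foldl
    (fun s paint =>
      let c := pvPaintCode paint
      if s.contains c then s.erase c else s) selected_line_option_codes
  PySem.List.sorted (sel ++ [pvPaintCode lowest_price_metallic_paint]) (fun x => x) false

-- ===== PORT B =====
-- the filtering loop of Source B: keep a code unless its removal budget in `d` is positive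
def pvKeep (sel : List String) (d : PySem.Dict String Int) : List String :=
  match sel with
  | [] => []
  | code :: rest =>
    if d.getD code 0 > 0 then pvKeep rest (d.insert code (d.getD code 0 - 1))
    else code :: pvKeep rest d

def update_selected_options_with_metallic_paint_alt (selected_line_option_codes : List String) (metallic_paints : List (List (String × String))) (non_metallic_paints : List (List (String × String))) (lowest_price_metallic_paint : List (String × String)) : List String :=
  let remaining := (metallic_paints ++ non_metallic_paints).foldl
    (fun d paint =>
      let c := pvPaintCode paint
      d.insert c (d.getD c 0 + 1)) PySem.Dict.empty
  let kept := pvKeep selected_line_option_codes remaining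
  PySem.List.sorted (kept ++ [pvPaintCode lowest_price_metallic_paint]) (fun x => x) false

-- ===== PRECONDITION & SPEC =====
-- Pre_ excludes exactly the inputs where A raises KeyError: some paint dict
-- (or the lowest-price one) lacks the "paint_code" key.
def Pre_update_selected_options_with_metallic_paint (selected_line_option_codes : List String) (metallic_paints : List (List (String × String))) (non_metallic_paints : List (List (String × String))) (lowest_price_metallic_paint : List (String × String)) : Prop :=
  (∀ p ∈ metallic_paints ++ non_metallic_paints, (PySem.Dict.mk p).contains "paint_code" = true) ∧
  (PySem.Dict.mk lowest_price_metallic_paint).contains "paint_code" = true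
instance (selected_line_option_codes : List String) (metallic_paints : List (List (String × String))) (non_metallic_paints : List (List (String × String))) (lowest_price_metallic_paint : List (String × String)) : Decidable (Pre_update_selected_options_with_metallic_paint selected_line_option_codes metallic_paints non_metallic_paints lowest_price_metallic_paint) := by unfold Pre_update_selected_options_with_metallic_paint; infer_instance

def pvWitness_update_selected_options_with_metallic_paint : List String × (List (List (String × String))) × (List (List (String × String))) × (List (String × String)) :=
  (["P01", "300"], [[("paint_code", "P01"), ("price", "100")]], [[("paint_code", "300")]], [("paint_code", "C3N")])

def Spec_update_selected_options_with_metallic_paint (selected_line_option_codes : List String) (metallic_paints : List (List (String × String))) (non_metallic_paints : List (List (String × String))) (lowest_price_metallic_paint : List (String × String)) (out : List String) : Prop := out = update_selected_options_with_metallic_paint_alt selected_line_option_codes metallic_paints non_metallic_paints lowest_price_metallic_paint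
instance (selected_line_option_codes : List String) (metallic_paints : List (List (String × String))) (non_metallic_paints : List (List (String × String))) (lowest_price_metallic_paint : List (String × String)) (out : List String) : Decidable (Spec_update_selected_options_with_metallic_paint selected_line_option_codes metallic_paints non_metallic_paints lowest_price_metallic_paint out) := by unfold Spec_update_selected_options_with_metallic_paint; infer_instance

-- ===== CLAIM (what is proved, stated in full; the proofs are below) =====
def Claim_equal_update_selected_options_with_metallic_paint : Prop := ∀ (selected_line_option_codes : List String) (metallic_paints : List (List (String × String))) (non_metallic_paints : List (List (String × String))) (lowest_price_metallic_paint : List (String × String)), Dom_update_selected_options_with_metallic_paint selected_line_option_codes metallic_paints non_metallic_paints lowest_price_metallic_paint → Pre_update_selected_options_with_metallic_paint selected_line_option_codes metallic_paints non_metallic_paints lowest_price_metallic_paint → Spec_update_selected_options_with_metallic_paint selected_line_option_codes metallic_paints non_metallic_paints lowest_price_metallic_paint (update_selected_options_with_metallic_paint selected_line_option_codes metallic_paints non_metallic_paints lowest_price_metallic_paint)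

-- ===== LEMMAS AND PROOFS =====

theorem pvWitness_ok :
    Dom_update_selected_options_with_metallic_paint (pvWitness_update_selected_options_with_metallic_paint.1) (pvWitness_update_selected_options_with_metallic_paint.2.1) (pvWitness_update_selected_options_with_metallic_paint.2.2.1) (pvWitness_update_selected_options_with_metallic_paint.2.2.2) ∧
    Pre_update_selected_options_with_metallic_paint (pvWitness_update_selected_options_with_metallic_paint.1) (pvWitness_update_selected_options_with_metallic_paint.2.1) (pvWitness_update_selected_options_with_metallic_paint.2.2.1) (pvWitness_update_selected_options_with_metallic_paint.2.2.2) := by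
  decide

-- 'if c in s: s.remove(c)' is just List.erase
theorem step_erase (s : List String) (c : String) :
    (if s.contains c then s.erase c else s) = s.erase c := by
  by_cases h : c ∈ s
  · simp [h]
  · simp [h, List.erase_of_not_mem h]

-- A's loop steps are plain erases
theorem foldA_eq (paints : List (List (String × String))) (sel : List String) :
    (paints.foldl (fun s paint =>
        let c := pvPaintCode paint
        if s.contains c then s.erase c else s) sel)
      = paints.foldl (fun s paint => s.erase (pvPaintCode paint)) sel := by
  induction paints generalizing sel with
  | nil => rfl
  | cons p ps ih => simp only [List.foldl_cons, step_erase]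

-- A's removal loop: each element's count drops by the count among the removal codes (truncated)
theorem countA (paints : List (List (String × String))) (sel : List String) (a : String) :
    ((paints.foldl (fun s paint =>
        let c := pvPaintCode paint
        if s.contains c then s.erase c else s) sel).count a)
      = sel.count a - (paints.map pvPaintCode).count a := by
  rw [foldA_eq]
  induction paints generalizing sel with
  | nil => simp
  | cons p ps ih =>
    simp only [List.foldl_cons, List.map_cons]
    rw [ih]
    rcases eq_or_ne a (pvPaintCode p) with h | h
    · subst h
      rw [List.count_erase_self, List.count_cons_self]
      omega
    · rw [List.count_erase_of_ne h, List.count_cons_of_ne h.symm]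

-- B's filtering pass: same truncated-subtraction count, for any nonnegative budget dict
theorem countB (sel : List String) (d : PySem.Dict String Int)
    (hnn : ∀ x, 0 ≤ d.getD x 0) (a : String) :
    (pvKeep sel d).count a = sel.count a - (d.getD a 0).toNat := by
  induction sel generalizing d with
  | nil => simp [pvKeep]
  | cons x xs ih =>
    rw [pvKeep]
    by_cases hx : d.getD x 0 > 0
    · rw [if_pos hx]
      rw [ih _ (by
        intro y
        rw [PySem.Dict.getD_insert]
        split
        · omega
        · exact hnn y)]
      rcases eq_or_ne a x with h | h
      · subst h
        rw [PySem.Dict.getD_insert, if_pos rfl, List.count_cons_self]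
        omega
      · rw [PySem.Dict.getD_insert, if_neg h, List.count_cons_of_ne h.symm]
    · rw [if_neg hx]
      have h0 : d.getD x 0 = 0 := le_antisymm (by omega) (hnn x)
      rcases eq_or_ne a x with h | h
      · subst h
        rw [List.count_cons_self, List.count_cons_self, ih _ hnn, h0]
        omega
      · rw [List.count_cons_of_ne h.symm, List.count_cons_of_ne h.symm, ih _ hnn]

-- the counting dict built by B holds exactly the code counts
theorem counter_getD (paints : List (List (String × String))) (a : String) :
    ((paints.foldl (fun d paint =>
        let c := pvPaintCode paint
        d.insert c (d.getD c 0 + 1)) PySem.Dict.empty).getD a 0)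
      = ((paints.map pvPaintCode).count a : Int) := by
  have h := PySem.Dict.getD_foldl_insert_add_one (κ := String)
      (l := paints.map pvPaintCode) (d := PySem.Dict.empty) (v := a)
  rw [List.foldl_map] at h
  simpa using h

-- ===== VERDICT (by name: the statement is the Claim_ definition above) =====
theorem update_selected_options_with_metallic_paint_spec : Claim_equal_update_selected_options_with_metallic_paint := by
  intro sel mp nmp lpm _ _
  unfold Spec_update_selected_options_with_metallic_paint
  unfold update_selected_options_with_metallic_paint update_selected_options_with_metallic_paint_alt
  simp only []
  rw [PySem.List.sorted_id_eq_sorted_id_iff_perm]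
  apply List.Perm.append_right
  rw [List.perm_iff_count]
  intro a
  rw [countA, countB]
  · rw [counter_getD]
    simp only [List.map_append, List.count_append]
    omega
  · intro x
    rw [counter_getD]
    positivity
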